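-- pv_equiv track=rewrite | github.com/Hojott/tira | vko1/twolists.py | count
-- ===== SOURCE A (Python) =====
-- def count(a, b):
--     amount = 0
--     #delta = 0
--     b_set = set()
--     for i in range(len(a)):
--         b_set.add(b[i])
--         if a[i] not in b_set:
--             amount += 1
--
--         #if a[i] not in set(b[0:i+1-delta]):
--         #    amount += 1
--         #    continue
--
--         #b.remove(a[i])
--         #delta += 1
--
--     return amount
-- ===== SOURCE B (Python) =====
-- def count(a, b):
--     first_occ = {}
--     for i in range(len(a)):
--         first_occ.setdefault(b[i], i)
--     amount = 0
--     for i in range(len(a)):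
--         j = first_occ.get(a[i])
--         if j is None or j > i:
--             amount += 1
--     return amount
-- ===== Notes on version B (the rewrite author's own statement) =====
-- stated objective: alternative
-- what changed: A makes one incremental pass growing a seen-set of b's prefix and testing membership; B first builds a first-occurrence index table of b[:len(a)] in one pass and then counts in a second pass by comparing each element's first-occurrence index with its position.
import Mathlib
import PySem

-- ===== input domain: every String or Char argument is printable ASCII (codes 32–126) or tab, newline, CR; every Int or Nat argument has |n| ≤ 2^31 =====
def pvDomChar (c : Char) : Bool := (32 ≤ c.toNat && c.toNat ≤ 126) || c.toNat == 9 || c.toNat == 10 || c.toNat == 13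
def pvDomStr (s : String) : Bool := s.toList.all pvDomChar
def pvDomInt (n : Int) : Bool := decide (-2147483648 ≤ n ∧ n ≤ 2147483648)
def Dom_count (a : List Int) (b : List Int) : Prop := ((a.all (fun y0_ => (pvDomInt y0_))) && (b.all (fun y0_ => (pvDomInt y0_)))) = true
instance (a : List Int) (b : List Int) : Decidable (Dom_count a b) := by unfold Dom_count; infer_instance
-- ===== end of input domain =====

-- B replaces A's incremental-set single pass by two passes: build a first-occurrence
-- index table of b[:len(a)] once, then count by comparing first-occurrence index with
-- position (objective: alternative; same cost, different algorithm).

-- ===== PORT A =====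
def count (a : List Int) (b : List Int) : Int :=
  ((PySem.List.pyRange 0 (a.length : Int) 1).foldl
    (fun st i =>
      let bset := PySem.Set.add st.1 (PySem.List.pyGetD b i 0)
      if PySem.Set.contains bset (PySem.List.pyGetD a i 0) then (bset, st.2)
      else (bset, st.2 + 1))
    ((PySem.Set.empty : PySem.Set Int), (0 : Int))).2

-- ===== PORT B =====
def count_alt (a : List Int) (b : List Int) : Int :=
  let firstOcc : PySem.Dict Int Int :=
    (PySem.List.pyRange 0 (a.length : Int) 1).foldl
      (fun d i => d.setdefault (PySem.List.pyGetD b i 0) i)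
      PySem.Dict.empty
  (PySem.List.pyRange 0 (a.length : Int) 1).foldl
    (fun amt i =>
      match firstOcc.get? (PySem.List.pyGetD a i 0) with
      | none => amt + 1
      | some j => if j > i then amt + 1 else amt)
    (0 : Int)

-- ===== PRECONDITION & SPEC =====
-- Pre_ excludes exactly the inputs with len(b) < len(a), on which Python A (and B) raise IndexError.
def Pre_count (a : List Int) (b : List Int) : Prop := a.length ≤ b.length
instance (a : List Int) (b : List Int) : Decidable (Pre_count a b) := by unfold Pre_count; infer_instance
def pvWitness_count : List Int × List Int := ([1, 2, 2], [2, 1, 3])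
def Spec_count (a : List Int) (b : List Int) (out : Int) : Prop := out = count_alt a b
instance (a : List Int) (b : List Int) (out : Int) : Decidable (Spec_count a b out) := by unfold Spec_count; infer_instance

-- ===== CLAIM (what is proved, stated in full; the proofs are below) =====
def Claim_equal_count : Prop := ∀ (a : List Int) (b : List Int), Dom_count a b → Pre_count a b → Spec_count a b (count a b)

-- ===== LEMMAS AND PROOFS =====

-- the common per-index condition: some j ≤ i has b[j] = a[i]
def pvHit (a b : List Int) (i : Nat) : Bool :=
  (List.range (i + 1)).any (fun j => PySem.List.pyGetD b (j : Int) 0 == PySem.List.pyGetD a (i : Int) 0)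

-- A's loop from index k, with the seen-set holding exactly b[0..k-1], counts the misses of the tail
theorem pv_A_loop (a b : List Int) :
    ∀ (m k : Nat) (s : PySem.Set Int) (amt : Int),
      k + m = a.length →
      (∀ x : Int, x ∈ s ↔ ∃ j : Nat, j < k ∧ PySem.List.pyGetD b (j : Int) 0 = x) →
      ((PySem.List.pyRange (k : Int) (a.length : Int) 1).foldl
        (fun st i =>
          let bset := PySem.Set.add st.1 (PySem.List.pyGetD b i 0)
          if PySem.Set.contains bset (PySem.List.pyGetD a i 0) then (bset, st.2)
          else (bset, st.2 + 1)) (s, amt)).2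
      = amt + ((List.range' k m).countP (fun i => !pvHit a b i) : Int) := by
  intro m
  induction m with
  | zero =>
    intro k s amt hk _
    rw [PySem.List.pyRange_one_eq_nil (by omega)]
    simp
  | succ m ih =>
    intro k s amt hk hs
    have hklt : (k : Int) < (a.length : Int) := by exact_mod_cast (by omega : k < a.length)
    rw [PySem.List.pyRange_one_cons hklt]
    simp only [List.foldl_cons]
    have hcast : (k : Int) + 1 = ((k + 1 : Nat) : Int) := by push_cast; ring
    -- the new set invariant
    have hs' : ∀ x : Int, x ∈ PySem.Set.add s (PySem.List.pyGetD b (k : Int) 0) ↔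
        ∃ j : Nat, j < k + 1 ∧ PySem.List.pyGetD b (j : Int) 0 = x := by
      intro x
      rw [PySem.Set.mem_add, hs]
      constructor
      · rintro (⟨j, hj, hjx⟩ | hx)
        · exact ⟨j, by omega, hjx⟩
        · exact ⟨k, by omega, hx.symm⟩
      · rintro ⟨j, hj, hjx⟩
        rcases Nat.lt_succ_iff_lt_or_eq.mp hj with h | h
        · exact Or.inl ⟨j, h, hjx⟩
        · subst h; exact Or.inr hjx.symm
    -- the branch test equals pvHit
    have hcond : PySem.Set.contains (PySem.Set.add s (PySem.List.pyGetD b (k : Int) 0))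
        (PySem.List.pyGetD a (k : Int) 0) = pvHit a b k := by
      by_cases h : pvHit a b k = true
      · rw [h]
        rw [PySem.Set.contains_iff, hs']
        rcases List.any_eq_true.mp h with ⟨j, hj, hjx⟩
        exact ⟨j, by simpa using List.mem_range.mp hj, by simpa using hjx⟩
      · have h' : pvHit a b k = false := by simpa using h
        rw [h']
        rw [Bool.eq_false_iff]
        intro hcon
        rcases (hs' _).mp ((PySem.Set.contains_iff _ _).mp hcon) with ⟨j, hj, hjx⟩
        have : pvHit a b k = true := List.any_eq_true.mpr ⟨j, List.mem_range.mpr hj, by simpa using hjx⟩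
        simp [h'] at this
    rw [List.range'_succ, List.countP_cons]
    by_cases h : pvHit a b k = true
    · rw [hcond, h]
      simp only [if_true]
      rw [hcast, ih (k + 1) _ amt (by omega) hs']
      simp
    · have h' : pvHit a b k = false := by simpa using h
      rw [hcond, h']
      simp only [Bool.false_eq_true, if_false]
      rw [hcast, ih (k + 1) _ (amt + 1) (by omega) hs']
      simp
      ring

-- B's setdefault loop: looking up the built table is looking up the first matching index
theorem pv_first_get (b : List Int) (l : List Int) (d : PySem.Dict Int Int) (v : Int) :
    ((l.foldl (fun d i => d.setdefault (PySem.List.pyGetD b i 0) i) d).get? v)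
      = ((d.get? v).or (l.find? (fun i => PySem.List.pyGetD b i 0 == v))) := by
  induction l generalizing d with
  | nil => simp
  | cons i l ih =>
    simp only [List.foldl_cons, List.find?_cons]
    by_cases hv : PySem.List.pyGetD b i 0 = v
    · subst hv
      have hb : (PySem.List.pyGetD b i 0 == PySem.List.pyGetD b i 0) = true := by simp
      rw [hb]
      by_cases hc : d.contains (PySem.List.pyGetD b i 0) = true
      · rw [PySem.Dict.setdefault_of_contains _ _ hc, ih]
        cases hg : d.get? (PySem.List.pyGetD b i 0) with
        | none =>
          rw [PySem.Dict.get?_eq_none_iff_contains] at hg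
          simp [hc] at hg
        | some w => simp
      · have hc' : d.contains (PySem.List.pyGetD b i 0) = false := by simpa using hc
        rw [PySem.Dict.setdefault_of_not_contains _ _ hc', ih,
          PySem.Dict.get?_insert_self,
          (PySem.Dict.get?_eq_none_iff_contains _ _).mpr hc']
        simp
    · have hb : (PySem.List.pyGetD b i 0 == v) = false := by simp [hv]
      rw [hb]
      by_cases hc : d.contains (PySem.List.pyGetD b i 0) = true
      · rw [PySem.Dict.setdefault_of_contains _ _ hc, ih]
      · have hc' : d.contains (PySem.List.pyGetD b i 0) = false := by simpa using hc
        rw [PySem.Dict.setdefault_of_not_contains _ _ hc', ih,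
          PySem.Dict.get?_insert_of_ne _ _ (Ne.symm hv)]

-- B's per-index test agrees with ¬(some j ≤ i has b[j] = a[i])
theorem pv_cond_eq (a b : List Int) (i : Nat) (hi : i < a.length) :
    (match ((PySem.List.pyRange 0 (a.length : Int) 1).foldl
        (fun d i => d.setdefault (PySem.List.pyGetD b i 0) i) PySem.Dict.empty).get?
        (PySem.List.pyGetD a (i : Int) 0) with
      | none => true
      | some j => decide (j > (i : Int))) = !pvHit a b i := by
  rw [pv_first_get, PySem.Dict.get?_empty, Option.none_or]
  rw [PySem.List.pyRange_one_append 0 ((i : Int) + 1) (a.length : Int) (by positivity)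
    (by exact_mod_cast (by omega : i + 1 ≤ a.length))]
  rw [List.find?_append]
  cases hf : List.find? (fun j => PySem.List.pyGetD b j 0 == PySem.List.pyGetD a (i : Int) 0)
      (PySem.List.pyRange 0 ((i : Int) + 1) 1) with
  | some j0 =>
    rw [Option.some_or]
    have hmem := List.mem_of_find?_eq_some hf
    rw [PySem.List.mem_pyRange_one] at hmem
    have hpe : PySem.List.pyGetD b j0 0 = PySem.List.pyGetD a (i : Int) 0 := by
      simpa using List.find?_some hf
    have hhit : pvHit a b i = true := by
      refine List.any_eq_true.mpr ⟨j0.toNat, List.mem_range.mpr (by omega), ?_⟩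
      have : ((j0.toNat : Nat) : Int) = j0 := by omega
      rw [this]
      simpa using hpe
    rw [hhit]
    simp only [Bool.not_true]
    simpa using (by omega : ¬ (j0 > (i : Int)))
  | none =>
    rw [Option.none_or]
    have hhit : pvHit a b i = false := by
      rw [Bool.eq_false_iff]
      intro h
      rcases List.any_eq_true.mp h with ⟨j, hj, hjx⟩
      have hj' : j < i + 1 := List.mem_range.mp hj
      have := List.find?_eq_none.mp hf (j : Int)
        (PySem.List.mem_pyRange_one.mpr ⟨by positivity, by exact_mod_cast hj'⟩)
      exact this (by simpa using hjx)
    rw [hhit, Bool.not_false]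
    cases hg : List.find? (fun j => PySem.List.pyGetD b j 0 == PySem.List.pyGetD a (i : Int) 0)
        (PySem.List.pyRange ((i : Int) + 1) (a.length : Int) 1) with
    | none => rfl
    | some j0 =>
      have hmem := List.mem_of_find?_eq_some hg
      rw [PySem.List.mem_pyRange_one] at hmem
      simpa using (by omega : j0 > (i : Int))

-- B's counting loop is a countP
theorem pv_B_loop (a : List Int) :
    ∀ (l : List Int) (d : PySem.Dict Int Int) (amt : Int),
      (l.foldl (fun amt i =>
        match (d.get? (PySem.List.pyGetD a i 0)) with
        | none => amt + 1
        | some j => if j > i then amt + 1 else amt) amt)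
      = amt + (l.countP (fun i =>
          match (d.get? (PySem.List.pyGetD a i 0)) with
          | none => true
          | some j => decide (j > i)) : Int) := by
  intro l
  induction l with
  | nil => intro d amt; simp
  | cons i l ih =>
    intro d amt
    rw [List.foldl_cons, List.countP_cons]
    cases hg : d.get? (PySem.List.pyGetD a i 0) with
    | none =>
      have e1 : (match (none : Option Int) with
          | none => (true : Bool) | some j => decide (j > i)) = true := rfl
      have e2 : (match (none : Option Int) with
          | none => amt + 1 | some j => if j > i then amt + 1 else amt) = amt + 1 := rfl
      rw [e1, e2, ih]
      push_cast
      simp only [if_true]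
      ring
    | some j =>
      by_cases hj : j > i
      · have e1 : (match (some j : Option Int) with
            | none => (true : Bool) | some j => decide (j > i)) = true := by
          simpa using hj
        have e2 : (match (some j : Option Int) with
            | none => amt + 1 | some j => if j > i then amt + 1 else amt) = amt + 1 := by
          simp [hj]
        rw [e1, e2, ih]
        push_cast
        simp only [if_true]
        ring
      · have e1 : (match (some j : Option Int) with
            | none => (true : Bool) | some j => decide (j > i)) = false := by
          simpa using hj
        have e2 : (match (some j : Option Int) with
            | none => amt + 1 | some j => if j > i then amt + 1 else amt) = amt := by
          simp [hj]
        rw [e1, e2, ih]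
        simp

-- ===== VERDICT (by name: the statement is the Claim_ definition above) =====
theorem count_spec : Claim_equal_count := by
  intro a b _ _
  unfold Spec_count count count_alt
  have hA := pv_A_loop a b a.length 0 PySem.Set.empty 0 (by omega) (by
    intro x
    constructor
    · intro hx; simp [PySem.Set.empty] at hx
    · rintro ⟨j, hj, _⟩; omega)
  rw [Nat.cast_zero] at hA
  rw [hA]
  rw [pv_B_loop]
  rw [← List.range_eq_range']
  have h1 : PySem.List.pyRange 0 (a.length : Int) 1 = List.map (fun k : Nat => (k : Int)) (List.range a.length) := by
    rw [PySem.List.pyRange_one]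
    simp only [zero_add, Int.sub_zero, Int.toNat_natCast]
  rw [h1, List.countP_map]
  congr 1
  refine congrArg _ (List.countP_congr ?_)
  intro k hk
  have hk' : k < a.length := List.mem_range.mp hk
  have hme := pv_cond_eq a b k hk'
  rw [h1] at hme
  simp only [Function.comp_apply]
  rw [hme]
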